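-- pv_equiv track=rewrite | github.com/AEFiGa/QualityAssurance | Actividad 4.2_Ejercicios/4.2.P1/computeStatistics.py | my_mode
-- ===== SOURCE A (Python) =====
-- def my_mode(my_dic):
--     """Function that obtains the mode"""
--     my_max = 0
--     mode = []
--     for key, value in my_dic.items():
--         if value == my_max:
--             mode.append(key)
--         elif value > my_max:
--             mode = [key]
--             my_max = value
--     if my_max > 1:
--         return mode
--     return []
-- ===== SOURCE B (Python) =====
-- def my_mode(my_dic):
--     """Function that obtains the mode"""
--     if not my_dic:
--         return []
--     m = max(my_dic.values())
--     if m > 1: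
--         return [k for k, v in my_dic.items() if v == m]
--     return []
-- ===== Notes on version B (the rewrite author's own statement) =====
-- stated objective: simpler
-- what changed: Replaces A's one-pass running-max accumulator (which rebuilds and discards candidate mode lists on each new maximum) with a two-pass shape: compute the peak frequency with max(), then filter the keys that attain it.
import Mathlib
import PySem

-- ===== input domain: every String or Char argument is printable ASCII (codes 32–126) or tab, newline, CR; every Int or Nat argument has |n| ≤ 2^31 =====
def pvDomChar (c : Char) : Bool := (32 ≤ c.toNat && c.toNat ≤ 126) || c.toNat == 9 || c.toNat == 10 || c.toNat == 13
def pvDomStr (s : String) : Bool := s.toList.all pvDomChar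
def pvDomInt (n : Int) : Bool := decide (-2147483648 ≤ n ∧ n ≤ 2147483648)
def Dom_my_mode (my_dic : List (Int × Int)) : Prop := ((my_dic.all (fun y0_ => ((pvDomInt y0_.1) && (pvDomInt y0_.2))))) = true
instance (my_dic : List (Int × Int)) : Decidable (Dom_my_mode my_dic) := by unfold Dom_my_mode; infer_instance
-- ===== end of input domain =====

-- B replaces A's single-pass running-max accumulator with a simpler two-pass shape (max of values, then filter the keys attaining it); same return value.


-- ===== PORT A =====
-- A: single pass with a running maximum `my_max` (starting at 0) and an accumulator `mode`.
def my_mode (my_dic : List (Int × Int)) : List Int :=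
  let st := my_dic.foldl
    (fun (s : Int × List Int) kv =>
      if kv.2 = s.1 then (s.1, s.2 ++ [kv.1])
      else if kv.2 > s.1 then (kv.2, [kv.1])
      else s)
    (0, [])
  if st.1 > 1 then st.2 else []

-- ===== PORT B =====
-- B: two passes — peak frequency via max(values), then filter the keys attaining it.
def my_mode_alt (my_dic : List (Int × Int)) : List Int :=
  if my_dic = [] then []
  else
    match PySem.List.max? (my_dic.map Prod.snd) (fun v => v) with
    | none => []
    | some m =>
      if m > 1 then (my_dic.filter (fun kv => kv.2 == m)).map Prod.fst
      else []

-- ===== PRECONDITION & SPEC =====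
def Spec_my_mode (my_dic : List (Int × Int)) (out : List Int) : Prop := out = my_mode_alt my_dic
instance (my_dic : List (Int × Int)) (out : List Int) : Decidable (Spec_my_mode my_dic out) := by unfold Spec_my_mode; infer_instance

-- ===== CLAIM (what is proved, stated in full; the proofs are below) =====
def Claim_equal_my_mode : Prop := ∀ (my_dic : List (Int × Int)), Dom_my_mode my_dic → Spec_my_mode my_dic (my_mode my_dic)

-- ===== LEMMAS AND PROOFS =====

-- Characterisation of A's fold: the first component is the running max of the values
-- (seeded with c), the second is the keys attaining it (prefixed by acc if the max never rose).
-- The running max is an upper bound of the seed.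
theorem my_mode_seed_le_foldmax (t : List (Int × Int)) (c : Int) :
    c ≤ t.foldl (fun a kv => max a kv.2) c := by
  induction t generalizing c with
  | nil => simp
  | cons x s ihs =>
    simp only [List.foldl_cons]
    exact le_trans (le_max_left c x.2) (ihs (max c x.2))

theorem my_mode_fold_spec (l : List (Int × Int)) (c : Int) (acc : List Int) :
    l.foldl
      (fun (s : Int × List Int) kv =>
        if kv.2 = s.1 then (s.1, s.2 ++ [kv.1])
        else if kv.2 > s.1 then (kv.2, [kv.1])
        else s)
      (c, acc)
    = (l.foldl (fun a kv => max a kv.2) c,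
       (if l.foldl (fun a kv => max a kv.2) c = c then acc else [])
         ++ (l.filter (fun kv => kv.2 == l.foldl (fun a kv => max a kv.2) c)).map Prod.fst) := by
  induction l generalizing c acc with
  | nil => simp
  | cons kv t ih =>
    have hge : ∀ (c' : Int), c' ≤ t.foldl (fun a kv => max a kv.2) c' :=
      fun c' => my_mode_seed_le_foldmax t c' 
    simp only [List.foldl_cons]
    by_cases h1 : kv.2 = c
    · rw [if_pos h1, ih]
      have hm : max c kv.2 = c := by omega
      simp only [hm]
      by_cases h2 : t.foldl (fun a kv => max a kv.2) c = c
      · simp [h2, List.filter_cons, h1, List.append_assoc]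
      · have : kv.2 ≠ t.foldl (fun a kv => max a kv.2) c := by rw [h1]; omega
        simp [h2, List.filter_cons, this]
    · rw [if_neg h1]
      by_cases h2 : kv.2 > c
      · rw [if_pos h2, ih]
        have hm : max c kv.2 = kv.2 := by omega
        simp only [hm]
        have hM := hge kv.2
        have hMc : t.foldl (fun a kv => max a kv.2) kv.2 ≠ c := by omega
        by_cases h3 : t.foldl (fun a kv => max a kv.2) kv.2 = kv.2
        · simp [h3, h1, List.filter_cons]
        · have : kv.2 ≠ t.foldl (fun a kv => max a kv.2) kv.2 := fun h => h3 h.symm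
          simp [h3, hMc, List.filter_cons, this]
      · rw [if_neg h2, ih]
        have hm : max c kv.2 = c := by omega
        simp only [hm]
        have hM := hge c
        have : kv.2 ≠ t.foldl (fun a kv => max a kv.2) c := by omega
        simp [List.filter_cons, this]

-- Bridging A's running max (seeded with 0) with max(values) over a nonempty list.
theorem my_mode_foldmax_eq (x : Int × Int) (t : List (Int × Int)) :
    (x :: t).foldl (fun a kv => max a kv.2) 0
      = max 0 ((t.map Prod.snd).foldl max x.2) := by
  simp only [List.foldl_cons]
  rw [show max (0 : Int) x.2 = max x.2 0 from max_comm _ _]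
  induction t generalizing x with
  | nil => simp [max_comm]
  | cons y s ihs =>
    simp only [List.foldl_cons, List.map_cons]
    rw [show max (max x.2 (0:Int)) y.2 = max (max x.2 y.2) 0 from by omega]
    exact ihs ⟨x.1, max x.2 y.2⟩

-- ===== VERDICT (by name: the statement is the Claim_ definition above) =====
theorem my_mode_spec : Claim_equal_my_mode := by
  intro l _
  unfold Spec_my_mode my_mode my_mode_alt
  cases l with
  | nil => simp
  | cons x t =>
    simp only [my_mode_fold_spec, List.map_cons, PySem.List.max?_id_cons, reduceCtorEq, if_false]
    have hfold := my_mode_foldmax_eq x t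
    set m := (t.map Prod.snd).foldl max x.2 with hm
    rw [hfold]
    by_cases h : m > 1
    · have : max (0 : Int) m = m := by omega
      rw [this, if_pos h, if_pos h]
      simp
    · have hle : max (0 : Int) m ≤ 1 := by omega
      rw [if_neg (by omega), if_neg h]
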